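-- pv_equiv track=rewrite | github.com/autobotbotbot11/naic-medtech | backend/apps/core/master_data_import.py | split_entry_blocks
-- ===== SOURCE A (Python) =====
-- def normalize_text(value):
--     if value is None:
--         return ""
--     return " ".join(str(value).replace("\n", " ").split()).strip()
--
-- def split_entry_blocks(value):
--     if not isinstance(value, str):
--         return []
--
--     blocks = []
--     current = []
--     for raw_line in value.splitlines():
--         line = normalize_text(raw_line)
--         if line:
--             current.append(line)
--             continue
--         if current:
--             blocks.append(current)
--             current = []
--
--     if current:
--         blocks.append(current)
--     return blocks
-- ===== SOURCE B (Python) =====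
-- def normalize_text(value):
--     if value is None:
--         return ""
--     return " ".join(str(value).replace("\n", " ").split()).strip()
--
-- def _blocks(lines):
--     # recursion on the list of normalized lines, building the result back-to-front:
--     # a non-empty head either starts a new block or is prepended to the block that
--     # the following (non-empty) line begins.
--     if not lines:
--         return []
--     head, rest = lines[0], lines[1:]
--     if not head:
--         return _blocks(rest)
--     rest_blocks = _blocks(rest)
--     if rest_blocks and rest and rest[0]:
--         return [[head] + rest_blocks[0]] + rest_blocks[1:]
--     return [[head]] + rest_blocks
--
-- def split_entry_blocks(value):
--     if not isinstance(value, str):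
--         return []
--     return _blocks([normalize_text(line) for line in value.splitlines()])
-- ===== Notes on version B (the rewrite author's own statement) =====
-- stated objective: alternative
-- what changed: Replaces A's single-pass accumulator loop with explicit current/flush bookkeeping by a map of the normalizer over the lines followed by a back-to-front recursion that either starts a new block or prepends the line to the block begun by the next non-empty line.
import Mathlib
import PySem

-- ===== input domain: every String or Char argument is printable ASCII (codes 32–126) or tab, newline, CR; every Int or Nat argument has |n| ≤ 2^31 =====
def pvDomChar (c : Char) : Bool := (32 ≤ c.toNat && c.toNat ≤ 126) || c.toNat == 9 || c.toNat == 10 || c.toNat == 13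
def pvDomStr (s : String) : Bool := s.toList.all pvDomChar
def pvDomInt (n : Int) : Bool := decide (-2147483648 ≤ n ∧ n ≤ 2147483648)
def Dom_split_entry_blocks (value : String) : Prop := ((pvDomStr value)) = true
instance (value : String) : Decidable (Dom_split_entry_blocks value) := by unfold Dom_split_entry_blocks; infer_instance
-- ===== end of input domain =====

-- B replaces A's accumulator loop (current + final flush) by normalizing all lines first
-- and a back-to-front recursion that prepends each non-empty line to the following block.

-- shared helper: Python's normalize_text (the None branch cannot occur for a str argument)
def normalize_text (value : String) : String :=
  PySem.Str.strip (PySem.Str.join " " (PySem.Str.split₀ (PySem.Str.replace value "\n" " ")))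

-- ===== PORT A =====
-- the loop body of A, on the already-normalized line
def stepA (st : List (List String) × List String) (line : String) :
    List (List String) × List String :=
  if line ≠ "" then (st.1, st.2 ++ [line])
  else if st.2 ≠ [] then (st.1 ++ [st.2], []) else st

def split_entry_blocks (value : String) : List (List String) :=
  let st := (PySem.Str.splitlines value).foldl
    (fun st raw_line => stepA st (normalize_text raw_line)) ([], [])
  if st.2 ≠ [] then st.1 ++ [st.2] else st.1

-- ===== PORT B =====
def blocksRec : List String → List (List String)
  | [] => []
  | head :: rest =>
    if head = "" then blocksRec rest
    else
      match blocksRec rest, rest with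
      | b :: bs, r :: _ =>
          if r = "" then [head] :: b :: bs else (head :: b) :: bs
      | rb, _ => [head] :: rb

def split_entry_blocks_alt (value : String) : List (List String) :=
  blocksRec ((PySem.Str.splitlines value).map normalize_text)

-- ===== PRECONDITION & SPEC =====
def Spec_split_entry_blocks (value : String) (out : List (List String)) : Prop := out = split_entry_blocks_alt value
instance (value : String) (out : List (List String)) : Decidable (Spec_split_entry_blocks value out) := by unfold Spec_split_entry_blocks; infer_instance

-- ===== CLAIM (what is proved, stated in full; the proofs are below) =====
def Claim_equal_split_entry_blocks : Prop := ∀ (value : String), Dom_split_entry_blocks value → Spec_split_entry_blocks value (split_entry_blocks value)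

-- ===== LEMMAS AND PROOFS =====

-- how a pending accumulator `cur` combines with the blocks of the remaining lines `ls`
def glue (cur : List String) (ls : List String) (rb : List (List String)) :
    List (List String) :=
  match cur, ls, rb with
  | [], _, rb => rb
  | cur, r :: _, b :: bs => if r = "" then cur :: b :: bs else (cur ++ b) :: bs
  | cur, _, rb => cur :: rb

lemma stepA_blank_nil (blocks : List (List String)) :
    stepA (blocks, []) "" = (blocks, []) := by simp [stepA]

lemma stepA_blank_cons (blocks : List (List String)) (c : String) (cs : List String) :
    stepA (blocks, c :: cs) "" = (blocks ++ [c :: cs], []) := by simp [stepA]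

lemma stepA_line (blocks : List (List String)) (cur : List String) {l : String}
    (hl : l ≠ "") : stepA (blocks, cur) l = (blocks, cur ++ [l]) := by simp [stepA, hl]

lemma foldl_stepA (ls : List String) :
    ∀ (blocks : List (List String)) (cur : List String),
      (let st := ls.foldl stepA (blocks, cur)
       if st.2 ≠ [] then st.1 ++ [st.2] else st.1)
      = blocks ++ glue cur ls (blocksRec ls) := by
  induction ls with
  | nil =>
    intro blocks cur
    cases cur <;> simp [glue, blocksRec]
  | cons l ls ih =>
    intro blocks cur
    by_cases hl : l = ""
    · subst hl
      cases cur with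
      | nil =>
        simp only [List.foldl_cons, stepA_blank_nil]
        simpa [blocksRec] using ih blocks []
      | cons c cs =>
        simp only [List.foldl_cons, stepA_blank_cons]
        rw [ih (blocks ++ [c :: cs]) []]
        simp only [glue, blocksRec, List.append_assoc]
        cases blocksRec ls <;> simp
    · simp only [List.foldl_cons, stepA_line _ _ hl]
      rw [ih blocks (cur ++ [l])]
      congr 1
      cases cur with
      | nil =>
        simp only [List.nil_append, blocksRec, if_neg hl]
        cases hr : blocksRec ls with
        | nil => cases ls <;> simp [glue]
        | cons b bs =>
          cases ls with
          | nil => simp [blocksRec] at hr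
          | cons r ls' =>
            by_cases hre : r = "" <;> simp [glue, hre]
      | cons c cs =>
        simp only [blocksRec, if_neg hl]
        cases hr : blocksRec ls with
        | nil => cases ls <;> simp [glue, hl]
        | cons b bs =>
          cases ls with
          | nil => simp [blocksRec] at hr
          | cons r ls' =>
            by_cases hre : r = "" <;> simp [glue, hre, hl]

-- ===== VERDICT (by name: the statement is the Claim_ definition above) =====
theorem split_entry_blocks_spec : Claim_equal_split_entry_blocks := by
  intro value _
  show split_entry_blocks value = split_entry_blocks_alt value
  have h := foldl_stepA ((PySem.Str.splitlines value).map normalize_text) [] []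
  rw [List.foldl_map] at h
  simpa [split_entry_blocks, split_entry_blocks_alt, glue] using h
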